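-- pv_equiv track=rewrite | github.com/TencentAILabHealthcare/ERAST | pipeline/utils.py | filter_sort
-- ===== SOURCE A (Python) =====
-- def filter_sort(original_list, filter_list):
--     filter_set = set(filter_list)
--
--     in_filter = []
--     not_in_filter = []
--
--     for item in original_list:
--         if item in filter_set:
--             in_filter.append(item)
--         else:
--             not_in_filter.append(item)
--
--     return in_filter + not_in_filter,len(in_filter)
-- ===== SOURCE B (Python) =====
-- def filter_sort(original_list, filter_list):
--     filter_set = set(filter_list)
--     result = sorted(original_list, key=lambda x: x not in filter_set)
--     count = sum(1 for x in original_list if x in filter_set)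
--     return result, count
-- ===== Notes on version B (the rewrite author's own statement) =====
-- stated objective: idiomatic
-- what changed: Replaces the explicit two-accumulator partition loop with a stable sort keyed on non-membership (in-filter items keep key False and precede the rest) plus a separate counting pass.
import Mathlib
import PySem

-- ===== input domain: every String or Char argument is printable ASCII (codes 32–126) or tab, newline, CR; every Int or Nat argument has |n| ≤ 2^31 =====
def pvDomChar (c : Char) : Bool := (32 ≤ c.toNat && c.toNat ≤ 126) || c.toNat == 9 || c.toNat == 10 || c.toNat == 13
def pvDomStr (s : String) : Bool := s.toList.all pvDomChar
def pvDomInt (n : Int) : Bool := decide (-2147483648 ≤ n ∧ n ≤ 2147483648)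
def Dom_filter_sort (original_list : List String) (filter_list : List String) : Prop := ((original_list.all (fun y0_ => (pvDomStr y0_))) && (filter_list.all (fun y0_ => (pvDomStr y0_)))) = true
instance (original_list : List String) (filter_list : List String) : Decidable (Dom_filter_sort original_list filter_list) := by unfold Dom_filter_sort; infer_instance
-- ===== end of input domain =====

-- B replaces A's explicit two-accumulator partition loop with a stable sort keyed on
-- non-membership plus a separate counting pass (idiomatic alternative, same result).


-- ===== PORT A =====
-- filter_set = set(filter_list); one loop appending each item to in_filter or not_in_filter;
-- return in_filter + not_in_filter, len(in_filter)
def filter_sort (original_list : List String) (filter_list : List String) : List String × Int :=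
  let filter_set : PySem.Set String := PySem.Set.ofList filter_list
  let r := original_list.foldl
    (fun (acc : List String × List String) item =>
      if filter_set.contains item then (acc.1 ++ [item], acc.2) else (acc.1, acc.2 ++ [item]))
    ([], [])
  (r.1 ++ r.2, (r.1.length : Int))

-- ===== PORT B =====
-- sorted(original_list, key=lambda x: x not in filter_set): the Bool key False/True is
-- ported as the Int 0/1 it compares as in Python; count = sum(1 for x in ol if x in set).
def filter_sort_alt (original_list : List String) (filter_list : List String) : List String × Int :=
  let filter_set : PySem.Set String := PySem.Set.ofList filter_list
  let result := PySem.List.sorted original_list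
    (fun x => if filter_set.contains x then (0 : Int) else 1) false
  let count := original_list.foldl
    (fun (acc : Int) x => if filter_set.contains x then acc + 1 else acc) 0
  (result, count)

-- ===== PRECONDITION & SPEC =====
def Spec_filter_sort (original_list : List String) (filter_list : List String) (out : List String × Int) : Prop := out = filter_sort_alt original_list filter_list
instance (original_list : List String) (filter_list : List String) (out : List String × Int) : Decidable (Spec_filter_sort original_list filter_list out) := by unfold Spec_filter_sort; infer_instance

-- ===== CLAIM (what is proved, stated in full; the proofs are below) =====
def Claim_equal_filter_sort : Prop := ∀ (original_list : List String) (filter_list : List String), Dom_filter_sort original_list filter_list → Spec_filter_sort original_list filter_list (filter_sort original_list filter_list)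

-- ===== LEMMAS AND PROOFS =====

-- the 0/1 key used by B's sort
def pvKey {α : Type} (p : α → Bool) (x : α) : Int := if p x then 0 else 1

-- insertBy skips over a prefix it never inserts before
theorem pv_insertBy_skip {α : Type} (before : α → α → Bool) (x : α) (A B : List α)
    (h : ∀ a ∈ A, before x a = false) :
    PySem.List.insertBy before x (A ++ B) = A ++ PySem.List.insertBy before x B := by
  induction A with
  | nil => simp
  | cons a t ih =>
      have ha := h a (by simp)
      simp [PySem.List.insertBy, ha, ih (fun b hb => h b (by simp [hb]))]

-- insertion sort with the 0/1 key, run from a partitioned accumulator, stays partitioned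
theorem pv_foldl_insertBy_part {α : Type} (p : α → Bool) (xs A B : List α)
    (hA : ∀ a ∈ A, p a = true) (hB : ∀ b ∈ B, p b = false) :
    xs.foldl (fun acc x =>
        PySem.List.insertBy (fun a b => decide (pvKey p a < pvKey p b)) x acc) (A ++ B)
      = (A ++ xs.filter p) ++ (B ++ xs.filter (fun x => !p x)) := by
  induction xs generalizing A B with
  | nil => simp
  | cons x t ih =>
      by_cases hx : p x = true
      · have hskip : PySem.List.insertBy (fun a b => decide (pvKey p a < pvKey p b)) x (A ++ B)
            = (A ++ [x]) ++ B := by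
          have h1 : ∀ a ∈ A, (decide (pvKey p x < pvKey p a) : Bool) = false := by
            intro a ha; simp [pvKey, hA a ha, hx]
          rw [pv_insertBy_skip _ _ _ _ h1]
          cases B with
          | nil => simp [PySem.List.insertBy]
          | cons b tb =>
              have : p b = false := hB b (by simp)
              simp [PySem.List.insertBy, pvKey, hx, this]
        have h1 : ∀ a ∈ A ++ [x], p a = true := by
          intro a ha; rcases List.mem_append.1 ha with h | h
          · exact hA a h
          · simp at h; simpa [h] using hx
        simp only [List.foldl_cons, hskip, ih (A ++ [x]) B h1 hB]
        simp [hx]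
      · have hx' : p x = false := by simpa using hx
        have hskip : PySem.List.insertBy (fun a b => decide (pvKey p a < pvKey p b)) x (A ++ B)
            = A ++ (B ++ [x]) := by
          have h1 : ∀ a ∈ A ++ B, (decide (pvKey p x < pvKey p a) : Bool) = false := by
            intro a ha
            rcases List.mem_append.1 ha with h | h
            · simp [pvKey, hA a h, hx']
            · simp [pvKey, hB a h, hx']
          have := pv_insertBy_skip (fun a b => decide (pvKey p a < pvKey p b)) x (A ++ B) [] h1
          simpa using this
        have h2 : ∀ b ∈ B ++ [x], p b = false := by
          intro b hb; rcases List.mem_append.1 hb with h | h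
          · exact hB b h
          · simp at h; simpa [h] using hx'
        simp only [List.foldl_cons, hskip, ih A (B ++ [x]) hA h2]
        simp [hx']

-- B's sort produces the two filtered groups in order
theorem pv_sorted_part {α : Type} (p : α → Bool) (xs : List α) :
    PySem.List.sorted xs (pvKey p) false = xs.filter p ++ xs.filter (fun x => !p x) := by
  rw [PySem.List.sorted_eq_foldl_insertBy]
  simpa using pv_foldl_insertBy_part p xs [] [] (by simp) (by simp)

-- A's partition loop from a partitioned accumulator
theorem pv_Aloop {α : Type} (p : α → Bool) (xs : List α) (A B : List α) :
    xs.foldl (fun (acc : List α × List α) item =>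
        if p item then (acc.1 ++ [item], acc.2) else (acc.1, acc.2 ++ [item])) (A, B)
      = (A ++ xs.filter p, B ++ xs.filter (fun x => !p x)) := by
  induction xs generalizing A B with
  | nil => simp
  | cons x t ih =>
      by_cases hx : p x = true
      · simp [hx, ih]
      · have hx' : p x = false := by simpa using hx
        simp [hx', ih]

-- B's counting pass counts the in-filter elements
theorem pv_count {α : Type} (p : α → Bool) (xs : List α) (c : Int) :
    xs.foldl (fun (acc : Int) x => if p x then acc + 1 else acc) c
      = c + ((xs.filter p).length : Int) := by
  induction xs generalizing c with
  | nil => simp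
  | cons x t ih =>
      by_cases hx : p x = true
      · simp [hx, ih]; ring
      · have hx' : p x = false := by simpa using hx
        simp [hx', ih]

-- ===== VERDICT (by name: the statement is the Claim_ definition above) =====
theorem filter_sort_spec : Claim_equal_filter_sort := by
  intro original_list filter_list _
  unfold Spec_filter_sort filter_sort filter_sort_alt
  have hS : PySem.List.sorted original_list
      (fun x => if (PySem.Set.ofList filter_list).contains x then (0 : Int) else 1) false
      = original_list.filter (fun x => (PySem.Set.ofList filter_list).contains x)
        ++ original_list.filter (fun x => !(PySem.Set.ofList filter_list).contains x) :=
    pv_sorted_part (fun x => (PySem.Set.ofList filter_list).contains x) original_list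
  simp only [pv_Aloop, pv_count, hS]
  simp
  exact List.filter_congr (fun x _ => by simp [PySem.Set.mem_ofList])
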